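-- pv_equiv track=rewrite | github.com/Valentino1994/dayAlgorithm | onedayAlgorithm/2022/01_January/12th/Examples/s2.py | solution
-- ===== SOURCE A (Python) =====
-- def solution(N):
--
--     cnt = 0
--
--     for i in range(N+1):
--         for j in range(60):
--             for k in range(60):
--                 if "3" in str(i) + str(j) + str(k):
--                     cnt += 1
--
--     return cnt
-- ===== SOURCE B (Python) =====
-- def solution(N):
--     # For each i the 60*60 (j,k) grid contributes a fixed amount: all 3600
--     # pairs count when str(i) contains '3'; otherwise only pairs where j or k
--     # contains '3' count, i.e. 3600 - 45*45 = 1575 (45 of 0..59 lack digit 3).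
--     cnt = 0
--     for i in range(N + 1):
--         cnt += 3600 if '3' in str(i) else 1575
--     return cnt
-- ===== Notes on version B (the rewrite author's own statement) =====
-- stated objective: faster
-- what changed: Replaced the inner 60x60 double loop over (j,k) by a closed-form per-i contribution (3600 if str(i) contains '3', else 1575 = 3600 - 45*45), leaving a single pass over i.
import Mathlib
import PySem

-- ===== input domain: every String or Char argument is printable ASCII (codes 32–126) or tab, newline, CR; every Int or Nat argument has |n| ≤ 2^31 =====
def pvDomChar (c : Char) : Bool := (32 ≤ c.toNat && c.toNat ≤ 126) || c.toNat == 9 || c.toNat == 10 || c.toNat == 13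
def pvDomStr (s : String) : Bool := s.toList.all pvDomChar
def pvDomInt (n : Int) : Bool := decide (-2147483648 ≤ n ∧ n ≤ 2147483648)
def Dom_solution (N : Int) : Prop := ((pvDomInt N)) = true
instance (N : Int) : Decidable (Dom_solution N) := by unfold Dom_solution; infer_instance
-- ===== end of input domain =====

-- B replaces A's inner 60x60 (j,k) double loop by the closed-form per-i contribution
-- (3600 if '3' in str(i) else 1575), one pass over i (objective: faster, constant factor).


-- ===== PORT A =====
-- str(i)+str(j)+str(k) is ported on the List Char side (PySem.Int.toChars, list append),
-- '"3" in s' is PySem.Chars.isIn ['3']; both are exact.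
def solution (N : Int) : Int :=
  (PySem.List.pyRange 0 (N + 1) 1).foldl (fun cnt i =>
    (PySem.List.pyRange 0 60 1).foldl (fun cnt j =>
      (PySem.List.pyRange 0 60 1).foldl (fun cnt k =>
        if PySem.Chars.isIn ['3']
            (PySem.Int.toChars i ++ PySem.Int.toChars j ++ PySem.Int.toChars k)
        then cnt + 1 else cnt) cnt) cnt) 0

-- ===== PORT B =====
def solution_alt (N : Int) : Int :=
  (PySem.List.pyRange 0 (N + 1) 1).foldl (fun cnt i =>
    cnt + (if PySem.Chars.isIn ['3'] (PySem.Int.toChars i) then 3600 else 1575)) 0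

-- ===== PRECONDITION & SPEC =====
def Spec_solution (N : Int) (out : Int) : Prop := out = solution_alt N
instance (N : Int) (out : Int) : Decidable (Spec_solution N out) := by unfold Spec_solution; infer_instance

-- ===== CLAIM (what is proved, stated in full; the proofs are below) =====
def Claim_equal_solution : Prop := ∀ (N : Int), Dom_solution N → Spec_solution N (solution N)

-- ===== LEMMAS AND PROOFS =====

-- '3' occurs in a concatenation iff it occurs in one of the parts (single-char needle).
lemma isIn_singleton_iff (c : Char) (s : List Char) :
    PySem.Chars.isIn [c] s = true ↔ c ∈ s := by
  rw [PySem.Chars.isIn_iff_infix]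
  constructor
  · intro h
    exact h.subset (List.mem_singleton_self c)
  · intro h
    obtain ⟨l1, l2, rfl⟩ := List.append_of_mem h
    exact ⟨l1, l2, by simp⟩

lemma c3_append (a b : List Char) :
    PySem.Chars.isIn ['3'] (a ++ b)
      = (PySem.Chars.isIn ['3'] a || PySem.Chars.isIn ['3'] b) := by
  rw [Bool.eq_iff_iff]
  simp [isIn_singleton_iff, List.mem_append]

lemma if_add (c : Bool) (x : Int) :
    (if c = true then x + 1 else x) = x + (if c = true then 1 else 0) := by
  cases c <;> simp

-- the innermost k-loop, for fixed prefix toChars i ++ toChars j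
lemma inner_k (a b : List Char) (cnt : Int) :
    (PySem.List.pyRange 0 60 1).foldl
      (fun c k => if PySem.Chars.isIn ['3'] (a ++ b ++ PySem.Int.toChars k) then c + 1 else c) cnt
    = cnt + (if (PySem.Chars.isIn ['3'] a || PySem.Chars.isIn ['3'] b) then 60 else 15) := by
  have h1 : (fun (c : Int) k =>
        if PySem.Chars.isIn ['3'] (a ++ b ++ PySem.Int.toChars k) then c + 1 else c)
      = (fun (c : Int) k =>
        c + (if ((PySem.Chars.isIn ['3'] a || PySem.Chars.isIn ['3'] b)
              || PySem.Chars.isIn ['3'] (PySem.Int.toChars k)) then 1 else 0)) := by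
    funext c k
    rw [c3_append, c3_append, if_add, Bool.or_assoc]
  rw [h1, PySem.List.foldl_add]
  cases hb : (PySem.Chars.isIn ['3'] a || PySem.Chars.isIn ['3'] b)
  · simp only [Bool.false_or]
    congr 1
  · simp only [Bool.true_or]
    congr 1

-- one outer-loop step: the whole (j,k) double loop adds 3600 or 1575
lemma step (i : Int) (cnt : Int) :
    (PySem.List.pyRange 0 60 1).foldl (fun cnt j =>
      (PySem.List.pyRange 0 60 1).foldl (fun cnt k =>
        if PySem.Chars.isIn ['3']
            (PySem.Int.toChars i ++ PySem.Int.toChars j ++ PySem.Int.toChars k)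
        then cnt + 1 else cnt) cnt) cnt
    = cnt + (if PySem.Chars.isIn ['3'] (PySem.Int.toChars i) then 3600 else 1575) := by
  have h1 : (fun (c : Int) j =>
        (PySem.List.pyRange 0 60 1).foldl (fun c k =>
          if PySem.Chars.isIn ['3']
              (PySem.Int.toChars i ++ PySem.Int.toChars j ++ PySem.Int.toChars k)
          then c + 1 else c) c)
      = (fun (c : Int) j =>
        c + (if (PySem.Chars.isIn ['3'] (PySem.Int.toChars i)
              || PySem.Chars.isIn ['3'] (PySem.Int.toChars j)) then 60 else 15)) := by
    funext c j
    exact inner_k _ _ c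
  rw [h1, PySem.List.foldl_add]
  cases hb : PySem.Chars.isIn ['3'] (PySem.Int.toChars i)
  · simp only [Bool.false_or]
    congr 1
  · simp only [Bool.true_or]
    congr 1

lemma outer (l : List Int) (cnt : Int) :
    l.foldl (fun cnt i =>
      (PySem.List.pyRange 0 60 1).foldl (fun cnt j =>
        (PySem.List.pyRange 0 60 1).foldl (fun cnt k =>
          if PySem.Chars.isIn ['3']
              (PySem.Int.toChars i ++ PySem.Int.toChars j ++ PySem.Int.toChars k)
          then cnt + 1 else cnt) cnt) cnt) cnt
    = l.foldl (fun cnt i =>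
        cnt + (if PySem.Chars.isIn ['3'] (PySem.Int.toChars i) then 3600 else 1575)) cnt := by
  induction l generalizing cnt with
  | nil => rfl
  | cons i t ih =>
    simp only [List.foldl_cons]
    rw [step i cnt]
    exact ih _

-- ===== VERDICT (by name: the statement is the Claim_ definition above) =====
theorem solution_spec : Claim_equal_solution := by
  intro N _
  show solution N = solution_alt N
  unfold solution solution_alt
  exact outer _ 0
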